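-- pv_equiv track=rewrite | github.com/ministrudels/advent-of-code-2023 | src/day_14/main.py | shift_rocks
-- ===== SOURCE A (Python) =====
-- from typing import List
--
-- def shift_rocks(line: List[str]) -> List[str]:
--     for i in range(len(line)):
--         if line[i] == "O":
--             j = i - 1
--             while j >= 0 and line[j] != "#":
--                 line[j], line[j + 1] = line[j + 1], line[j]
--                 j -= 1
--     return line
-- ===== SOURCE B (Python) =====
-- from typing import List
--
-- def shift_rocks(line: List[str]) -> List[str]:
--     out = []
--     rocks = 0
--     rest = []
--     for c in line:
--         if c == "#":
--             out += ["O"] * rocks + rest + ["#"]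
--             rocks = 0
--             rest = []
--         elif c == "O":
--             rocks += 1
--         else:
--             rest.append(c)
--     out += ["O"] * rocks + rest
--     line[:] = out
--     return line
-- ===== Notes on version B (the rewrite author's own statement) =====
-- stated objective: alternative
-- what changed: Replaces the per-rock leftward bubble-swap inner loop with a single pass that counts 'O's and buffers other cells per '#'-delimited segment, emitting each segment as rocks-then-rest.
import Mathlib
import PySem

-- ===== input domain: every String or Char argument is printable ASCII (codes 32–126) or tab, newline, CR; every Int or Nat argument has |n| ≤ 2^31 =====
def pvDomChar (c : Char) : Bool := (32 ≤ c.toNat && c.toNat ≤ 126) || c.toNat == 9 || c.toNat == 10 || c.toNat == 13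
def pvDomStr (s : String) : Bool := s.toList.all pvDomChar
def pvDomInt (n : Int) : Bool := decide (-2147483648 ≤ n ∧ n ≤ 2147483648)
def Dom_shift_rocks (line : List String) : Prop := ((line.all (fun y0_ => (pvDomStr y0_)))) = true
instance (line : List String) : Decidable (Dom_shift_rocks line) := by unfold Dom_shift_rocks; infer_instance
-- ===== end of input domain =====

-- B replaces A's per-rock bubble-swap inner loop with a single pass that counts 'O's and buffers
-- the other cells per '#'-delimited segment, emitting each segment as rocks-then-rest.
-- A mutates its argument in place and returns it; B performs the same mutation (line[:] = out);
-- the equivalence proved here is about the return value.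

-- ===== PORT A =====
-- Python's simultaneous swap: line[j], line[j+1] = line[j+1], line[j]
def pvSwap (l : List String) (j : Nat) : List String :=
  (l.set j (l.getD (j + 1) "")).set (j + 1) (l.getD j "")

-- the inner while loop; fuel k encodes j + 1 (loop runs while j ≥ 0, i.e. k > 0)
def pvInner (l : List String) : Nat → List String
  | 0 => l
  | k + 1 => if l.getD k "" ≠ "#" then pvInner (pvSwap l k) k else l

def shift_rocks (line : List String) : List String :=
  (List.range line.length).foldl
    (fun l i => if l.getD i "" = "O" then pvInner l i else l) line

-- ===== PORT B =====
-- fold state: (out, rocks, rest)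
def pvStepB (s : List String × Nat × List String) (c : String) : List String × Nat × List String :=
  if c = "#" then (s.1 ++ List.replicate s.2.1 "O" ++ s.2.2 ++ ["#"], 0, [])
  else if c = "O" then (s.1, s.2.1 + 1, s.2.2)
  else (s.1, s.2.1, s.2.2 ++ [c])

def shift_rocks_alt (line : List String) : List String :=
  let s := line.foldl pvStepB ([], 0, [])
  s.1 ++ List.replicate s.2.1 "O" ++ s.2.2

-- ===== PRECONDITION & SPEC =====
def Spec_shift_rocks (line : List String) (out : List String) : Prop := out = shift_rocks_alt line
instance (line : List String) (out : List String) : Decidable (Spec_shift_rocks line out) := by unfold Spec_shift_rocks; infer_instance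

-- ===== CLAIM (what is proved, stated in full; the proofs are below) =====
def Claim_equal_shift_rocks : Prop := ∀ (line : List String), Dom_shift_rocks line → Spec_shift_rocks line (shift_rocks line)

-- ===== LEMMAS AND PROOFS =====

-- B's fold state after a prefix p, and its flushed value
def pvSt (p : List String) : List String × Nat × List String := p.foldl pvStepB ([], 0, [])
def pvFlush (s : List String × Nat × List String) : List String :=
  s.1 ++ List.replicate s.2.1 "O" ++ s.2.2

theorem pvSt_snoc (p : List String) (c : String) :
    pvSt (p ++ [c]) = pvStepB (pvSt p) c := by
  simp [pvSt, List.foldl_append]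

theorem pvAlt_eq_flush (l : List String) : shift_rocks_alt l = pvFlush (pvSt l) := rfl

theorem pvGetD_at_len (u t : List String) (a : String) :
    (u ++ a :: t).getD u.length "" = a := by
  induction u with
  | nil => rfl
  | cons d u' ih => simpa using ih

theorem pvSwap_at_len (u t : List String) (a x : String) :
    pvSwap (u ++ a :: x :: t) u.length = u ++ x :: a :: t := by
  induction u with
  | nil => simp [pvSwap, List.getD]
  | cons d u' ih =>
      simp only [pvSwap] at ih ⊢
      simpa using ih

-- bubble with no wall: x slides in front of the whole block u
theorem pvInner_no_wall (u t : List String) (x : String)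
    (hu : ∀ c ∈ u, c ≠ "#") :
    pvInner (u ++ x :: t) u.length = x :: u ++ t := by
  induction u using List.reverseRecOn generalizing t with
  | nil => rfl
  | append_singleton u' a ih =>
      have ha : a ≠ "#" := hu a (by simp)
      have hget : ((u' ++ [a]) ++ x :: t).getD u'.length "" = a := by
        simpa using pvGetD_at_len u' (x :: t) a
      have hswap : pvSwap ((u' ++ [a]) ++ x :: t) u'.length = u' ++ x :: a :: t := by
        simpa using pvSwap_at_len u' t a x
      have hlen : (u' ++ [a]).length = u'.length + 1 := by simp
      rw [hlen, pvInner, if_pos (by simpa [hget] using ha), hswap,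
        ih (a :: t) (fun c hc => hu c (by simp [hc]))]
      simp

-- bubble stopped by a wall: x slides to just right of the "#"
theorem pvInner_wall (v u t : List String) (x : String)
    (hu : ∀ c ∈ u, c ≠ "#") :
    pvInner (v ++ "#" :: u ++ x :: t) (v.length + 1 + u.length)
      = v ++ "#" :: x :: u ++ t := by
  induction u using List.reverseRecOn generalizing t with
  | nil =>
      have hget : (v ++ "#" :: x :: t).getD v.length "" = "#" :=
        pvGetD_at_len v (x :: t) "#"
      simp [pvInner, hget]
  | append_singleton u' a ih =>
      have ha : a ≠ "#" := hu a (by simp)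
      have hre : v ++ "#" :: (u' ++ [a]) ++ x :: t
          = (v ++ "#" :: u') ++ a :: x :: t := by simp
      have hlen2 : (v ++ "#" :: u').length = v.length + 1 + u'.length := by
        simp; omega
      have hget : ((v ++ "#" :: u') ++ a :: x :: t).getD (v.length + 1 + u'.length) "" = a := by
        rw [← hlen2]; exact pvGetD_at_len _ _ a
      have hswap : pvSwap ((v ++ "#" :: u') ++ a :: x :: t) (v.length + 1 + u'.length)
          = (v ++ "#" :: u') ++ x :: a :: t := by
        rw [← hlen2]; exact pvSwap_at_len _ _ a x
      have hfuel : v.length + 1 + (u' ++ [a]).length = (v.length + 1 + u'.length) + 1 := by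
        simp; omega
      rw [hre, hfuel, pvInner, if_pos (by rw [hget]; exact ha), hswap]
      have := ih (a :: t) (fun c hc => hu c (by simp [hc]))
      simp only [List.append_assoc, List.cons_append] at this ⊢
      rw [this]
      simp

-- state invariant: out is empty or ends with "#", rest has no "#", lengths add up
theorem pvInv (p : List String) :
    ((pvSt p).1 = [] ∨ ∃ v, (pvSt p).1 = v ++ ["#"]) ∧ ("#" ∉ (pvSt p).2.2) ∧
      (pvSt p).1.length + (pvSt p).2.1 + (pvSt p).2.2.length = p.length := by
  induction p using List.reverseRecOn with
  | nil => simp [pvSt]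
  | append_singleton p c ih =>
      obtain ⟨hout, hrest, hlen⟩ := ih
      rw [pvSt_snoc]
      by_cases h1 : c = "#"
      · subst h1
        refine ⟨Or.inr ⟨_, rfl⟩, by simp [pvStepB], ?_⟩
        simp [pvStepB]; omega
      · by_cases h2 : c = "O"
        · subst h2
          refine ⟨by simpa [pvStepB] using hout, by simpa [pvStepB] using hrest, ?_⟩
          simp [pvStepB]; omega
        · refine ⟨by simpa [pvStepB, h1, h2] using hout, ?_, ?_⟩
          · simp [pvStepB, h1, h2]
            exact ⟨hrest, fun h => h1 h.symm⟩
          · simp [pvStepB, h1, h2]; omega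

theorem pvFlush_len (p : List String) : (pvFlush (pvSt p)).length = p.length := by
  have := (pvInv p).2.2
  simp [pvFlush]; omega

-- appending a non-"O" cell just appends it to the flushed value
theorem pvFlush_snoc_nonO (p : List String) (c : String) (hc : c ≠ "O") :
    pvFlush (pvSt (p ++ [c])) = pvFlush (pvSt p) ++ [c] := by
  rw [pvSt_snoc]
  by_cases h1 : c = "#"
  · subst h1; simp [pvStepB, pvFlush]
  · simp [pvStepB, h1, hc, pvFlush]

theorem pvFlush_snoc_O (p : List String) :
    pvFlush (pvSt (p ++ ["O"])) = (pvSt p).1 ++ "O" :: List.replicate (pvSt p).2.1 "O" ++ (pvSt p).2.2 := by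
  rw [pvSt_snoc]
  simp [pvStepB, pvFlush, List.replicate_succ]

-- main loop invariant for A's outer fold
theorem pvMain (s : List String) : ∀ p : List String,
    (List.range' p.length s.length).foldl
      (fun l i => if l.getD i "" = "O" then pvInner l i else l) (pvFlush (pvSt p) ++ s)
      = pvFlush (pvSt (p ++ s)) := by
  induction s with
  | nil => intro p; simp
  | cons c s' ih =>
      intro p
      rw [List.length_cons, List.range'_succ, List.foldl_cons]
      have hgc : (pvFlush (pvSt p) ++ c :: s').getD p.length "" = c := by
        rw [← pvFlush_len p]; exact pvGetD_at_len _ _ c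
      by_cases hc : c = "O"
      · subst hc
        rw [if_pos hgc]
        have hstep : pvInner (pvFlush (pvSt p) ++ "O" :: s') p.length
            = pvFlush (pvSt (p ++ ["O"])) ++ s' := by
          obtain ⟨hout, hrest, hlen⟩ := pvInv p
          have hu : ∀ x ∈ List.replicate (pvSt p).2.1 "O" ++ (pvSt p).2.2, x ≠ "#" := by
            intro x hx
            rcases List.mem_append.1 hx with h | h
            · rw [List.eq_of_mem_replicate h]; decide
            · exact fun he => hrest (he ▸ h)
          rcases hout with h0 | ⟨v, hv⟩
          · have hL : pvFlush (pvSt p)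
                = List.replicate (pvSt p).2.1 "O" ++ (pvSt p).2.2 := by
              simp [pvFlush, h0]
            have hlen' : p.length = (List.replicate (pvSt p).2.1 "O" ++ (pvSt p).2.2).length := by
              rw [h0] at hlen; simp at hlen ⊢; omega
            rw [hL, hlen', pvInner_no_wall _ _ _ hu, pvFlush_snoc_O, h0]
            simp [List.replicate_succ]
          · have hL : pvFlush (pvSt p) ++ "O" :: s'
                = v ++ "#" :: (List.replicate (pvSt p).2.1 "O" ++ (pvSt p).2.2) ++ "O" :: s' := by
              simp [pvFlush, hv]
            have hlen' : p.length
                = v.length + 1 + (List.replicate (pvSt p).2.1 "O" ++ (pvSt p).2.2).length := by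
              rw [hv] at hlen; simp at hlen ⊢; omega
            rw [hL, hlen']
            have := pvInner_wall v (List.replicate (pvSt p).2.1 "O" ++ (pvSt p).2.2) s' "O" hu
            simp only [List.append_assoc, List.cons_append] at this ⊢
            rw [this, pvFlush_snoc_O, hv]
            simp
        rw [hstep]
        have := ih (p ++ ["O"])
        simpa using this
      · rw [if_neg (by rw [hgc]; exact hc)]
        have hre : pvFlush (pvSt p) ++ c :: s' = pvFlush (pvSt (p ++ [c])) ++ s' := by
          rw [pvFlush_snoc_nonO p c hc]; simp
        rw [hre]
        have := ih (p ++ [c])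
        simpa using this

-- ===== VERDICT (by name: the statement is the Claim_ definition above) =====
theorem shift_rocks_spec : Claim_equal_shift_rocks := by
  intro line _
  show shift_rocks line = shift_rocks_alt line
  rw [pvAlt_eq_flush, shift_rocks, List.range_eq_range']
  have := pvMain line []
  simpa [pvSt, pvFlush] using this
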